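-- pv_equiv track=rewrite | github.com/Xemnas0/wikitext_to_logseq | src/converter.py | _parse_infobox
-- ===== SOURCE A (Python) =====
-- def _parse_infobox(infobox):
--     # Split the input string into lines
--     lines = infobox.split("\n")
--
--     # Initialize a list to hold the output lines
--     output_lines = []
--
--     # Flag when lists are being iterated
--
--     multiline_buffer = []
--
--     # Loop over the lines
--     for line in lines:
--         line = line.strip()
--         # If the line starts with "|", add it to the output unchanged
--         if line.startswith("|"):
--             if multiline_buffer:
--                 output_lines[-1] = output_lines[-1] + " " + ", ".join(multiline_buffer)
--                 multiline_buffer = []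
--             output_lines.append(line[1::].replace(" =", "::"))
--         # If the line starts with "*", replace it with a comma
--         elif line.startswith("*"):
--             multiline_buffer.append(line[1:])
--
--     if multiline_buffer:
--         output_lines[-1] = output_lines[-1] + " " + ", ".join(multiline_buffer)
--     # Join the output lines into a single string
--     output_string = "\n".join(output_lines)
--
--     # Return the output string
--     return output_string + "\n"
-- ===== SOURCE B (Python) =====
-- def _parse_infobox(infobox):
--     # Filter down to the marker lines, then render them by recursive chunking.
--     marks = [l for l in (raw.strip() for raw in infobox.split("\n"))
--              if l.startswith(("|", "*"))]
--     return "\n".join(_render(marks)) + "\n"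
--
--
-- def _render(marks):
--     # Recursively consume one property chunk: a '|' line plus its run of '*' items.
--     if not marks:
--         return []
--     head, rest = marks[0], marks[1:]
--     if head.startswith("*"):
--         # stray bullet before any property line: drop it (A raises IndexError here)
--         return _render(rest)
--     i = 0
--     while i < len(rest) and rest[i].startswith("*"):
--         i += 1
--     text = head[1:].replace(" =", "::")
--     if i:
--         text += " " + ", ".join(m[1:] for m in rest[:i])
--     return [text] + _render(rest[i:])
-- ===== Notes on version B (the rewrite author's own statement) =====
-- stated objective: alternative
-- what changed: B first filters the stripped lines down to the marker lines, then renders them by structural recursion that spans each '|' line together with its run of '*' lines (takeWhile/dropWhile chunking), instead of A's stateful single pass that back-patches the last output line from a flush buffer.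
-- crash fix: When a stripped '*' line occurs before any stripped '|' line A raises IndexError (output_lines[-1] on an empty list); B drops such stray bullets and returns the rendering of the remaining chunks. — e.g. on _parse_infobox("* a\n|x = y"): A raises IndexError, B returns "x:: y\n"
import Mathlib
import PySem

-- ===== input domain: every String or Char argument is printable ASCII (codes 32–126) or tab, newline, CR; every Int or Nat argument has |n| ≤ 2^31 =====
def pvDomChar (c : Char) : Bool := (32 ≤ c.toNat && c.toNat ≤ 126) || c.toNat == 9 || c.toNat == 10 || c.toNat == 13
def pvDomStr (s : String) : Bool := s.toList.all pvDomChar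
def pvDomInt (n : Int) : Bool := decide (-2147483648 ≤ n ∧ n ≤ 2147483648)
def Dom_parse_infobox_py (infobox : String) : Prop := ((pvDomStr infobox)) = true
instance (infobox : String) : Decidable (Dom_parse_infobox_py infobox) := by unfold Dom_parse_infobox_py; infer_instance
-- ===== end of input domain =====

-- B changes the decomposition: filter the stripped lines down to the marker lines, then render
-- them by recursion that spans each '|' line with its run of '*' lines, instead of A's
-- stateful single pass that back-patches the last output line from a flush buffer.


-- ===== PORT A =====
-- output_lines[-1] = output_lines[-1] + " " + ", ".join(multiline_buffer)
-- (on out = [] Python raises IndexError; that input is excluded by Pre_, the port returns out unchanged there)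
def pvFlushA (out : List (List Char)) (buf : List (List Char)) : List (List Char) :=
  match out.getLast? with
  | some l => out.dropLast ++ [l ++ ' ' :: PySem.Chars.join [',', ' '] buf]
  | none => out

-- the body of A's 'for line in lines' loop; state = (output_lines, multiline_buffer)
def pvStepA (st : List (List Char) × List (List Char)) (raw : List Char) :
    List (List Char) × List (List Char) :=
  let line := PySem.Chars.strip raw
  if PySem.Chars.startswith line ['|'] then
    let out := if st.2.isEmpty then st.1 else pvFlushA st.1 st.2
    (out ++ [PySem.Chars.replace (PySem.List.slice line (some 1) none) [' ', '='] [':', ':']], [])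
  else if PySem.Chars.startswith line ['*'] then
    (st.1, st.2 ++ [PySem.List.slice line (some 1) none])
  else st

def parse_infobox_py (infobox : String) : String :=
  let lines := PySem.Chars.splitOn infobox.toList ['\n']
  let st := lines.foldl pvStepA ([], [])
  let out := if st.2.isEmpty then st.1 else pvFlushA st.1 st.2
  String.ofList (PySem.Chars.join ['\n'] out ++ ['\n'])

-- ===== PORT B =====
-- B's recursive renderer _render: one chunk = a '|' line and its run of '*' lines.
-- Python's counting while-loop plus the slices rest[:i] / rest[i:] (i = number of leading
-- '*' lines of rest) are ported exactly as takeWhile / dropWhile on the same predicate.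
def pvRenderChunks : List (List Char) → List (List Char)
  | [] => []
  | head :: rest =>
    if PySem.Chars.startswith head ['*'] then pvRenderChunks rest
    else
      let items := rest.takeWhile (fun m => PySem.Chars.startswith m ['*'])
      let text0 := PySem.Chars.replace (PySem.List.slice head (some 1) none) [' ', '='] [':', ':']
      let text := if items.isEmpty then text0
        else text0 ++ ' ' :: PySem.Chars.join [',', ' ']
          (items.map (fun m => PySem.List.slice m (some 1) none))
      text :: pvRenderChunks (rest.dropWhile (fun m => PySem.Chars.startswith m ['*']))
termination_by ms => ms.length
decreasing_by
  · simp
  · have := List.length_dropWhile_le (fun m => PySem.Chars.startswith m ['*']) rest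
    simp at this ⊢; omega

def parse_infobox_py_alt (infobox : String) : String :=
  let marks := ((PySem.Chars.splitOn infobox.toList ['\n']).map PySem.Chars.strip).filter
    (fun l => PySem.Chars.startswith l ['|'] || PySem.Chars.startswith l ['*'])
  String.ofList (PySem.Chars.join ['\n'] (pvRenderChunks marks) ++ ['\n'])

-- ===== PRECONDITION & SPEC =====
-- the stripped lines of the input that are markers ('|' or '*' lines)
def pvMarkersL (lines : List (List Char)) : List (List Char) :=
  (lines.map PySem.Chars.strip).filter
    (fun l => PySem.Chars.startswith l ['|'] || PySem.Chars.startswith l ['*'])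

def pvOkB (lines : List (List Char)) : Bool :=
  (pvMarkersL lines).head?.all (fun l => PySem.Chars.startswith l ['|'])

-- Pre_ excludes exactly the inputs where a stripped '*' line precedes every stripped '|' line:
-- there A raises IndexError (output_lines[-1] on the empty list).
def Pre_parse_infobox_py (infobox : String) : Prop :=
  pvOkB (PySem.Chars.splitOn infobox.toList ['\n']) = true
instance (infobox : String) : Decidable (Pre_parse_infobox_py infobox) := by
  unfold Pre_parse_infobox_py; infer_instance

def pvWitness_parse_infobox_py : String := "|name = Foo\n* a\n* b\n|kind = Bar"

-- When a stripped '*' line occurs before any stripped '|' line A raises IndexError; B drops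
-- such stray bullets and returns the rendering of the remaining chunks.
def Raises_parse_infobox_py (infobox : String) : Prop :=
  ((pvMarkersL (PySem.Chars.splitOn infobox.toList ['\n'])).head?.elim false
    (fun l => PySem.Chars.startswith l ['*'])) = true
instance (infobox : String) : Decidable (Raises_parse_infobox_py infobox) := by
  unfold Raises_parse_infobox_py; infer_instance

def pvRaiseWitness_parse_infobox_py : String := "* a\n|x = y"
def pvRaiseWitnessOut_parse_infobox_py : String := "x:: y\n"

def Spec_parse_infobox_py (infobox : String) (out : String) : Prop := out = parse_infobox_py_alt infobox
instance (infobox : String) (out : String) : Decidable (Spec_parse_infobox_py infobox out) := by unfold Spec_parse_infobox_py; infer_instance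

-- ===== CLAIM (what is proved, stated in full; the proofs are below) =====
def Claim_equal_parse_infobox_py : Prop := ∀ (infobox : String), Dom_parse_infobox_py infobox → Pre_parse_infobox_py infobox → Spec_parse_infobox_py infobox (parse_infobox_py infobox)
def Claim_raises_parse_infobox_py : Prop := (∀ (infobox : String), Dom_parse_infobox_py infobox → Raises_parse_infobox_py infobox → ¬ Pre_parse_infobox_py infobox) ∧ (Dom_parse_infobox_py (pvRaiseWitness_parse_infobox_py) ∧ Raises_parse_infobox_py (pvRaiseWitness_parse_infobox_py) ∧ parse_infobox_py_alt (pvRaiseWitness_parse_infobox_py) = pvRaiseWitnessOut_parse_infobox_py)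

-- ===== LEMMAS AND PROOFS =====

-- A's loop body on an already-stripped line (pvStepA raw = pvStepA' (strip raw))
def pvStepA' (st : List (List Char) × List (List Char)) (line : List Char) :
    List (List Char) × List (List Char) :=
  if PySem.Chars.startswith line ['|'] then
    (( if st.2.isEmpty then st.1 else pvFlushA st.1 st.2) ++
     [PySem.Chars.replace (PySem.List.slice line (some 1) none) [' ', '='] [':', ':']], [])
  else if PySem.Chars.startswith line ['*'] then
    (st.1, st.2 ++ [PySem.List.slice line (some 1) none])
  else st

def pvMark (l : List Char) : Bool :=
  PySem.Chars.startswith l ['|'] || PySem.Chars.startswith l ['*']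

def pvFlush (st : List (List Char) × List (List Char)) : List (List Char) :=
  if st.2.isEmpty then st.1 else pvFlushA st.1 st.2

lemma pvStartswith_ne {a b : Char} (hab : a ≠ b) (l : List Char)
    (h : PySem.Chars.startswith l [a] = true) : PySem.Chars.startswith l [b] = false := by
  rcases (PySem.Chars.startswith_iff l [a]).mp h with ⟨t, ht⟩
  subst ht
  rw [Bool.eq_false_iff]
  intro hc
  rcases (PySem.Chars.startswith_iff _ [b]).mp hc with ⟨t', ht'⟩
  simp at ht'
  exact hab ht'.1.symm

lemma pvStepA'_id (st : List (List Char) × List (List Char)) (l : List Char)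
    (h : pvMark l = false) : pvStepA' st l = st := by
  simp [pvMark] at h
  simp [pvStepA', h.1, h.2]

lemma pvFoldl_filter (ls : List (List Char)) :
    ∀ st, ls.foldl pvStepA' st = (ls.filter pvMark).foldl pvStepA' st := by
  induction ls with
  | nil => intro st; rfl
  | cons l rest ih =>
    intro st
    by_cases h : pvMark l = true
    · simp [h, List.foldl_cons, ih]
    · simp only [Bool.not_eq_true] at h
      simp [h, List.foldl_cons, ih, pvStepA'_id st l h]

lemma pvFoldl_stars (items : List (List Char)) :
    ∀ st, (∀ m ∈ items, PySem.Chars.startswith m ['*'] = true) →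
      items.foldl pvStepA' st =
        (st.1, st.2 ++ items.map (fun m => PySem.List.slice m (some 1) none)) := by
  induction items with
  | nil => intro st _; simp
  | cons m rest ih =>
    intro st h
    have hm := h m (by simp)
    have hpipe : PySem.Chars.startswith m ['|'] = false :=
      pvStartswith_ne (by decide) m hm
    rw [List.foldl_cons, ih _ (fun x hx => h x (by simp [hx]))]
    simp [pvStepA', hpipe, hm]

lemma pvFlushA_concat (xs : List (List Char)) (l : List Char) (buf : List (List Char)) :
    pvFlushA (xs ++ [l]) buf = xs ++ [l ++ ' ' :: PySem.Chars.join [',', ' '] buf] := by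
  simp [pvFlushA]

lemma pvMem_takeWhile {α : Type} (q : α → Bool) (l : List α) (x : α)
    (h : x ∈ l.takeWhile q) : q x = true := by
  induction l with
  | nil => simp [List.takeWhile] at h
  | cons a as ih =>
    rw [List.takeWhile_cons] at h
    by_cases ha : q a = true
    · rw [if_pos ha] at h
      rcases List.mem_cons.mp h with rfl | h2
      · exact ha
      · exact ih h2
    · rw [if_neg ha] at h; simp at h

lemma pvHead_dropWhile {α : Type} (q : α → Bool) (ls : List α) (l : α)
    (h : (ls.dropWhile q).head? = some l) : q l = false := by
  induction ls with
  | nil => simp [List.dropWhile] at h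
  | cons x rest ih =>
    rw [List.dropWhile_cons] at h
    by_cases hx : q x = true
    · rw [if_pos hx] at h; exact ih h
    · rw [if_neg hx] at h
      simp at h; subst h; simpa using hx

-- the main invariant: A's fold-then-flush over marker lines is B's chunk rendering
lemma pvMain : ∀ (n : Nat) (ms : List (List Char)), ms.length ≤ n →
    ∀ st, (∀ m ∈ ms, pvMark m = true) →
    (∀ l, ms.head? = some l → PySem.Chars.startswith l ['|'] = true) →
    (st.2 = [] ∨ st.1 ≠ []) →
    pvFlush (ms.foldl pvStepA' st) = pvFlush st ++ pvRenderChunks ms := by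
  intro n
  induction n with
  | zero =>
    intro ms hlen st _ _ _
    have hms : ms = [] := by
      cases ms with
      | nil => rfl
      | cons a b => simp at hlen
    subst hms
    simp [pvRenderChunks]
  | succ n ih =>
    intro ms hlen st hall hhd hne
    match ms with
    | [] => simp [pvRenderChunks]
    | head :: rest =>
      have hpipe := hhd head rfl
      have hstar : PySem.Chars.startswith head ['*'] = false :=
        pvStartswith_ne (by decide) head hpipe
      set items := rest.takeWhile (fun m => PySem.Chars.startswith m ['*']) with hitems
      set rest' := rest.dropWhile (fun m => PySem.Chars.startswith m ['*']) with hrest'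
      set text0 := PySem.Chars.replace (PySem.List.slice head (some 1) none)
        [' ', '='] [':', ':'] with htext0
      set slices := items.map (fun m => PySem.List.slice m (some 1) none) with hslices
      set text := (if items.isEmpty then text0
        else text0 ++ ' ' :: PySem.Chars.join [',', ' '] slices) with htext
      have hdecomp : items ++ rest' = rest := List.takeWhile_append_dropWhile
      have hstep : pvStepA' st head = (pvFlush st ++ [text0], []) := by
        simp [pvStepA', hpipe, pvFlush]
        rw [htext0]
      have hmid : items.foldl pvStepA' (pvFlush st ++ [text0], []) =
          (pvFlush st ++ [text0], slices) := by
        have hstars : ∀ m ∈ items, PySem.Chars.startswith m ['*'] = true := by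
          intro m hm
          rw [hitems] at hm
          exact pvMem_takeWhile (fun m => PySem.Chars.startswith m ['*']) rest m hm
        have := pvFoldl_stars items (pvFlush st ++ [text0], []) hstars
        simpa using this
      have hfold : (head :: rest).foldl pvStepA' st =
          rest'.foldl pvStepA' (pvFlush st ++ [text0], slices) := by
        conv_lhs => rw [List.foldl_cons, hstep, ← hdecomp]
        rw [List.foldl_append, hmid]
      have hall' : ∀ m ∈ rest', pvMark m = true := by
        intro m hm
        apply hall m
        apply List.mem_cons_of_mem
        rw [← hdecomp]
        exact List.mem_append_right items hm
      have hhd' : ∀ l, rest'.head? = some l → PySem.Chars.startswith l ['|'] = true := by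
        intro l hl
        have h1 := pvHead_dropWhile _ rest l (hrest' ▸ hl)
        have h2 := hall' l (List.mem_of_mem_head? hl)
        simpa [pvMark, h1] using h2
      have hlen' : rest'.length ≤ n := by
        rw [hrest']
        have h1 := List.length_dropWhile_le
          (fun m => PySem.Chars.startswith m ['*']) rest
        simp at hlen
        omega
      have hrec := ih rest' hlen' (pvFlush st ++ [text0], slices) hall' hhd' (by simp)
      have hflushmid : pvFlush (pvFlush st ++ [text0], slices) = pvFlush st ++ [text] := by
        by_cases hi : items.isEmpty
        · have : slices = [] := by
            rw [hslices]; simp at hi; simp [hi]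
          simp [pvFlush, this, htext, hi]
        · have hsl : slices.isEmpty = false := by
            rw [hslices]; simp at hi ⊢; simp [hi]
          simp only [pvFlush, hsl, if_neg Bool.false_ne_true]
          rw [pvFlushA_concat]
          simp [htext, hi]
      have hchunks : pvRenderChunks (head :: rest) = text :: pvRenderChunks rest' := by
        rw [pvRenderChunks.eq_def]
        simp only [hstar, Bool.false_eq_true, ← hitems, ← hrest',
          ← htext0, ← hslices, ← htext]
        simp
      rw [hfold, hrec, hflushmid, hchunks]
      simp

-- ===== VERDICT (by name: the statement is the Claim_ definition above) =====
theorem parse_infobox_py_spec : Claim_equal_parse_infobox_py := by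
  intro infobox _ hpre
  unfold Spec_parse_infobox_py parse_infobox_py parse_infobox_py_alt
  dsimp only
  have hall : ∀ m ∈ pvMarkersL (PySem.Chars.splitOn infobox.toList ['\n']), pvMark m = true := by
    intro m hm
    have := List.of_mem_filter hm
    simpa [pvMark] using this
  have hhd : ∀ l, (pvMarkersL (PySem.Chars.splitOn infobox.toList ['\n'])).head? = some l →
      PySem.Chars.startswith l ['|'] = true := by
    intro l hl
    unfold Pre_parse_infobox_py pvOkB at hpre
    rw [hl] at hpre
    simpa using hpre
  have hA : (PySem.Chars.splitOn infobox.toList ['\n']).foldl pvStepA ([], []) =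
      (pvMarkersL (PySem.Chars.splitOn infobox.toList ['\n'])).foldl pvStepA' ([], []) := by
    have h1 : (PySem.Chars.splitOn infobox.toList ['\n']).foldl pvStepA ([], []) =
        ((PySem.Chars.splitOn infobox.toList ['\n']).map PySem.Chars.strip).foldl pvStepA' ([], []) := by
      rw [List.foldl_map]; rfl
    rw [h1, pvFoldl_filter]; rfl
  have h := pvMain (pvMarkersL (PySem.Chars.splitOn infobox.toList ['\n'])).length
    (pvMarkersL (PySem.Chars.splitOn infobox.toList ['\n'])) le_rfl ([], []) hall hhd (by simp)
  have key : (if ((PySem.Chars.splitOn infobox.toList ['\n']).foldl pvStepA ([], [])).2.isEmpty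
        then ((PySem.Chars.splitOn infobox.toList ['\n']).foldl pvStepA ([], [])).1
        else pvFlushA ((PySem.Chars.splitOn infobox.toList ['\n']).foldl pvStepA ([], [])).1
          ((PySem.Chars.splitOn infobox.toList ['\n']).foldl pvStepA ([], [])).2) =
      pvRenderChunks (pvMarkersL (PySem.Chars.splitOn infobox.toList ['\n'])) := by
    have h2 : pvFlush ((PySem.Chars.splitOn infobox.toList ['\n']).foldl pvStepA ([], [])) =
        pvRenderChunks (pvMarkersL (PySem.Chars.splitOn infobox.toList ['\n'])) := by
      rw [hA, h]; simp [pvFlush]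
    simpa [pvFlush] using h2
  unfold pvMarkersL at key
  rw [key]

-- evaluation of B's port on the crash witness (pvRenderChunks is well-founded, so its
-- equations are applied by rw instead of decide)
lemma pvRC_nil : pvRenderChunks [] = [] := by rw [pvRenderChunks.eq_def]

lemma pvRaiseVal : parse_infobox_py_alt pvRaiseWitness_parse_infobox_py =
    pvRaiseWitnessOut_parse_infobox_py := by
  unfold parse_infobox_py_alt pvRaiseWitness_parse_infobox_py
  dsimp only
  have hmarks : ((PySem.Chars.splitOn ("* a\n|x = y" : String).toList ['\n']).map
      PySem.Chars.strip).filter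
      (fun l => PySem.Chars.startswith l ['|'] || PySem.Chars.startswith l ['*']) =
      [['*', ' ', 'a'], ['|', 'x', ' ', '=', ' ', 'y']] := by decide
  rw [hmarks]
  have e1 : pvRenderChunks [['*', ' ', 'a'], ['|', 'x', ' ', '=', ' ', 'y']] =
      pvRenderChunks [['|', 'x', ' ', '=', ' ', 'y']] := by
    rw [pvRenderChunks.eq_def]
    simp [show PySem.Chars.startswith ['*', ' ', 'a'] ['*'] = true from by decide]
  have e2 : pvRenderChunks [['|', 'x', ' ', '=', ' ', 'y']] =
      [['x', ':', ':', ' ', 'y']] := by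
    rw [pvRenderChunks.eq_def]
    simp [show PySem.Chars.startswith ['|', 'x', ' ', '=', ' ', 'y'] ['*'] = false from by decide,
      pvRC_nil]
    decide
  rw [e1, e2]
  decide

theorem parse_infobox_py_raises : Claim_raises_parse_infobox_py := by
  unfold Claim_raises_parse_infobox_py
  refine ⟨?_, by decide, by decide, pvRaiseVal⟩
  intro infobox _ hr hpre
  unfold Raises_parse_infobox_py at hr
  unfold Pre_parse_infobox_py pvOkB at hpre
  cases hh : (pvMarkersL (PySem.Chars.splitOn infobox.toList ['\n'])).head? with
  | none => simp [hh] at hr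
  | some l =>
    simp [hh] at hr hpre
    have h1 := (PySem.Chars.startswith_iff l ['*']).mp hr
    have h2 := (PySem.Chars.startswith_iff l ['|']).mp hpre
    rcases h1 with ⟨t1, h1⟩
    rcases h2 with ⟨t2, h2⟩
    rw [← h1] at h2
    simp at h2

-- self-check: the crash-fix witness value stated in Claim_raises_, extracted for direct reading
theorem pvRaiseWitness_parse_infobox_py_ok :
    parse_infobox_py_alt pvRaiseWitness_parse_infobox_py = pvRaiseWitnessOut_parse_infobox_py := by
  have h := parse_infobox_py_raises
  unfold Claim_raises_parse_infobox_py at h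
  exact h.2.2.2
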